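-- pv_equiv track=rewrite | github.com/Algorithm-Passport/AlgorithmStudy | src/sooho-Kang/4주차/3107.py | solution
-- ===== SOURCE A (Python) =====
-- from collections import deque, Counter
--
-- def solution(strs):
--     # str list로 변환하여 str내에 값을 추가할 수 있도록함
--     strs = list(strs)
--
--     #::있는 경우 검사 ::를 만나면 문자열안에 빈 블록만큼 :0룰 추가해줌
--     for i in range(len(strs)):
--         if i < len(strs) and strs[i] == ":" and strs[i + 1] == ":":
--             strs[i] = ":0" * (8 - Counter(strs)[":"])
--             break
--
--     # 리스트로 변환했던 문자열을 deque자료구조로 변환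
--     arr = list(map(deque, "".join(strs).split(":")))
--     for i in range(len(arr)):
--         # 자른 문자열의 길이가 4가 아니라면 없는 숫자만큼 0을 앞에 붙여준다
--         if len(arr[i]) != 4:
--             while len(arr[i]) != 4:
--                 arr[i].appendleft("0")
--         arr[i] = "".join(arr[i])
--
--     return ":".join(arr)
-- ===== SOURCE B (Python) =====
-- def solution(strs):
--     # Expand an abbreviated IPv6 address: split on "::" (if present) and insert
--     # enough "0" groups to reach 8, then right-justify every group to width 4.
--     if "::" in strs:
--         left, right = strs.split("::", 1)
--         groups = left.split(":") + ["0"] * (8 - strs.count(":")) + right.split(":")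
--     else:
--         groups = strs.split(":")
--     return ":".join(g.rjust(4, "0") for g in groups)
-- ===== Notes on version B (the rewrite author's own statement) =====
-- stated objective: simpler
-- what changed: Replaced A's char-by-char scan that splices a ':0'*(8-colons) string into the character list plus a deque appendleft padding loop by a direct split on the first '::' with ['0']*(8-colons) groups inserted and str.rjust(4,'0') per group.
import Mathlib
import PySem

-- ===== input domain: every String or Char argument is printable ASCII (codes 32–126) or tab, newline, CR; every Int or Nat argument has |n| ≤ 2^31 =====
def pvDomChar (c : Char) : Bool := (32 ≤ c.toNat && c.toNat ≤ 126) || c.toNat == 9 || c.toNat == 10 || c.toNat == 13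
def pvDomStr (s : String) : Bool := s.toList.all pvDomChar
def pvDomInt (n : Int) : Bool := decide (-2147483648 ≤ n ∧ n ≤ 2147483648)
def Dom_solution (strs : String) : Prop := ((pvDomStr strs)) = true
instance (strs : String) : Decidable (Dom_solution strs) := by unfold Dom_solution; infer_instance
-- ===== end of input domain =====

-- B replaces A's character-splicing scan and deque padding loop by a direct
-- split on '::' with inserted "0" groups and per-group rjust: simpler, same cost.


-- ===== PORT A =====
-- ":0" * n  (Python string repetition; n already clamped at 0 by Int.toNat below)
def pvRep (n : Nat) : List Char := (List.replicate n [':', '0']).flatten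

-- A's for-loop: scan for the first i with strs[i] = ':' and strs[i+1] = ':',
-- replace that element by rep and stop (break).  When the scan sits on a final
-- ':' with nothing after it Python raises IndexError (excluded by Pre_); here
-- the else branch is taken.
def pvScanA (rep : List Char) : List Char → List Char
  | [] => []
  | c :: rest =>
    if c = ':' ∧ rest.head? = some ':' then rep ++ rest
    else c :: pvScanA rep rest

-- A's appendleft-while loop.  Python diverges when the group is longer than 4
-- (excluded by Pre_); the fuel of 4 only makes the same computation total.
def pvPadFuel : Nat → List Char → List Char
  | 0, g => g
  | fuel + 1, g => if g.length = 4 then g else pvPadFuel fuel ('0' :: g)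

def solution (strs : String) : String :=
  let cs := strs.toList
  let rep := pvRep (8 - (cs.count ':' : Int)).toNat   -- ":0" * (8 - Counter(strs)[":"])
  let joined := pvScanA rep cs
  let groups := PySem.Chars.splitOn joined [':']
  String.mk (PySem.Chars.join [':'] (groups.map (pvPadFuel 4)))

-- ===== PORT B =====
-- strs.split("::", 1) fused with the '"::" in strs' test: none = no occurrence,
-- some (l, r) = the parts before/after the FIRST "::" (exact, step for step).
def pvSplitDC : List Char → Option (List Char × List Char)
  | [] => none
  | c :: rest =>
    if c = ':' ∧ rest.head? = some ':' then some ([], rest.tail)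
    else (pvSplitDC rest).map (fun p => (c :: p.1, p.2))

-- g.rjust(4, "0")
def pvRjust4 (g : List Char) : List Char := List.replicate (4 - g.length) '0' ++ g

def solution_alt (strs : String) : String :=
  let cs := strs.toList
  let groups :=
    match pvSplitDC cs with
    | some (l, r) =>
        PySem.Chars.splitOn l [':']
          ++ List.replicate (8 - (PySem.Chars.count cs [':'] : Int)).toNat ['0']
          ++ PySem.Chars.splitOn r [':']
    | none => PySem.Chars.splitOn cs [':']
  String.mk (PySem.Chars.join [':'] (groups.map pvRjust4))

-- ===== PRECONDITION & SPEC =====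
-- Pre_ excludes exactly the inputs on which A does not return: it raises
-- IndexError on a trailing ':' not preceded by ':' when no "::" occurs, and its
-- while-loop diverges when some ':'-separated group is longer than 4 characters.
def Pre_solution (strs : String) : Prop :=
  (∀ g ∈ PySem.Chars.splitOn strs.toList [':'], g.length ≤ 4) ∧
  (strs.toList.getLast? = some ':' → PySem.Chars.isIn [':', ':'] strs.toList = true)
instance (strs : String) : Decidable (Pre_solution strs) := by unfold Pre_solution; infer_instance
def pvWitness_solution : String := "1::2"

def Spec_solution (strs : String) (out : String) : Prop := out = solution_alt strs
instance (strs : String) (out : String) : Decidable (Spec_solution strs out) := by unfold Spec_solution; infer_instance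

-- ===== CLAIM (what is proved, stated in full; the proofs are below) =====
def Claim_equal_solution : Prop := ∀ (strs : String), Dom_solution strs → Pre_solution strs → Spec_solution strs (solution strs)

-- ===== LEMMAS AND PROOFS =====

-- PySem.Chars.count with a single-character needle is List.count.
theorem pvCountGo (fuel : Nat) (l : List Char) (acc : Nat) (h : l.length ≤ fuel) :
    PySem.Chars.count.go [':'] fuel l acc = acc + l.count ':' := by
  induction fuel generalizing l acc with
  | zero =>
    have : l = [] := by cases l <;> simp_all
    subst this; simp [PySem.Chars.count.go]
  | succ n ih =>
    cases l with
    | nil => simp [PySem.Chars.count.go]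
    | cons c t =>
      rw [PySem.Chars.count.go]
      by_cases hc : c = ':'
      · subst hc
        simp only [List.isPrefixOf, BEq.rfl, Bool.true_and, if_true, List.length_singleton,
          List.drop_one, List.tail_cons]
        rw [ih t (acc + 1) (by simpa using h)]
        simp; omega
      · have hcb : (':' == c) = false := by rw [beq_eq_false_iff_ne]; exact fun h => hc h.symm
        simp only [List.isPrefixOf, hcb, Bool.false_and, Bool.false_eq_true, if_false]
        rw [ih t acc (by simpa using h)]
        simp [hc]

theorem pvCount_colon (l : List Char) : PySem.Chars.count l [':'] = l.count ':' := by
  simp [PySem.Chars.count, pvCountGo l.length l 0 le_rfl]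

theorem pvSplitGo (fuel : Nat) (l cur : List Char) (acc : List (List Char)) (h : l.length ≤ fuel) :
    PySem.Chars.splitOn.go [':'] fuel l cur acc
      = acc.reverse ++ (List.splitOnP (· == ':') l).modifyHead (cur.reverse ++ ·) := by
  induction fuel generalizing l cur acc with
  | zero =>
    have : l = [] := by cases l <;> simp_all
    subst this; simp [PySem.Chars.splitOn.go]
  | succ n ih =>
    cases l with
    | nil => simp [PySem.Chars.splitOn.go]
    | cons c t =>
      rw [PySem.Chars.splitOn.go]
      by_cases hc : c = ':'
      · subst hc
        simp only [List.isPrefixOf, BEq.rfl, Bool.true_and, if_true, List.length_singleton,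
          List.drop_one, List.tail_cons]
        rw [ih t [] (cur.reverse :: acc) (by simpa using h)]
        simp [List.splitOnP_cons, show (fun x : List Char => x) = id from rfl, List.modifyHead_id]
      · have hcb : (':' == c) = false := by rw [beq_eq_false_iff_ne]; exact fun h => hc h.symm
        simp only [List.isPrefixOf, hcb, Bool.false_and, Bool.false_eq_true, if_false]
        rw [ih t (c :: cur) acc (by simpa using h)]
        simp [List.splitOnP_cons, hc, List.modifyHead_modifyHead, Function.comp_def]

theorem pvSplitOn_colon (l : List Char) :
    PySem.Chars.splitOn l [':'] = List.splitOnP (· == ':') l := by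
  rw [PySem.Chars.splitOn, pvSplitGo (l.length + 1) l [] [] (by omega)]
  simp [show (fun x : List Char => x) = id from rfl, List.modifyHead_id]

theorem pvScan_none (rep cs : List Char) (h : pvSplitDC cs = none) : pvScanA rep cs = cs := by
  induction cs with
  | nil => simp [pvScanA]
  | cons c rest ih =>
    by_cases hc : c = ':' ∧ rest.head? = some ':'
    · simp [pvSplitDC, hc] at h
    · simp only [pvSplitDC, if_neg hc, Option.map_eq_none_iff] at h
      simp [pvScanA, if_neg hc, ih h]

theorem pvScan_some (rep cs l r : List Char) (h : pvSplitDC cs = some (l, r)) :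
    pvScanA rep cs = l ++ rep ++ ':' :: r := by
  induction cs generalizing l r with
  | nil => simp [pvSplitDC] at h
  | cons c rest ih =>
    by_cases hc : c = ':' ∧ rest.head? = some ':'
    · simp only [pvSplitDC, if_pos hc, Option.some.injEq, Prod.mk.injEq] at h
      obtain ⟨hl, hr⟩ := h
      subst hl; subst hr
      obtain ⟨hcc, hh⟩ := hc
      subst hcc
      cases rest with
      | nil => simp at hh
      | cons d t =>
        simp only [List.head?_cons, Option.some.injEq] at hh
        subst hh
        simp [pvScanA]
    · simp only [pvSplitDC, if_neg hc] at h
      obtain ⟨p, hp, hpe⟩ := Option.map_eq_some_iff.mp h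
      obtain ⟨l', r'⟩ := p
      simp only [Prod.mk.injEq] at hpe
      obtain ⟨hl, hr⟩ := hpe
      subst hl; subst hr
      rw [pvScanA, if_neg hc, ih l' r' hp]
      simp

theorem pvSplitDC_eq (cs l r : List Char) (h : pvSplitDC cs = some (l, r)) :
    cs = l ++ ':' :: ':' :: r := by
  induction cs generalizing l r with
  | nil => simp [pvSplitDC] at h
  | cons c rest ih =>
    by_cases hc : c = ':' ∧ rest.head? = some ':'
    · simp only [pvSplitDC, if_pos hc, Option.some.injEq, Prod.mk.injEq] at h
      obtain ⟨hl, hr⟩ := h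
      subst hl; subst hr
      obtain ⟨hcc, hh⟩ := hc
      cases rest with
      | nil => simp at hh
      | cons d t =>
        simp only [List.head?_cons, Option.some.injEq] at hh
        subst hh; subst hcc
        simp
    · simp only [pvSplitDC, if_neg hc] at h
      obtain ⟨p, hp, hpe⟩ := Option.map_eq_some_iff.mp h
      obtain ⟨l', r'⟩ := p
      simp only [Prod.mk.injEq] at hpe
      obtain ⟨hl, hr⟩ := hpe
      subst hl; subst hr
      rw [ih l' r' hp]
      simp

theorem pvSplit_rep (n : Nat) (l r : List Char) :
    List.splitOnP (· == ':') (l ++ pvRep n ++ ':' :: r)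
      = List.splitOnP (· == ':') l ++ List.replicate n ['0'] ++ List.splitOnP (· == ':') r := by
  induction n generalizing l with
  | zero =>
    simpa [pvRep] using List.splitOnP_append_cons (· == ':') l r ':' rfl
  | succ n ih =>
    have hshape : l ++ pvRep (n + 1) ++ ':' :: r
        = l ++ ':' :: (['0'] ++ pvRep n ++ ':' :: r) := by
      simp [pvRep, List.replicate_succ]
    rw [hshape, List.splitOnP_append_cons (· == ':') l _ ':' rfl, ih ['0']]
    simp [List.replicate_succ]

theorem pvPad_eq (g : List Char) (h : g.length ≤ 4) : pvPadFuel 4 g = pvRjust4 g := by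
  unfold pvRjust4
  interval_cases hl : g.length <;> simp_all [pvPadFuel, List.replicate]

theorem pv_main (strs : String) (hpre : Pre_solution strs) :
    solution strs = solution_alt strs := by
  obtain ⟨h4, -⟩ := hpre
  rw [pvSplitOn_colon] at h4
  unfold solution solution_alt
  simp only [pvSplitOn_colon, pvCount_colon]
  cases hdc : pvSplitDC strs.toList with
  | none =>
    rw [pvScan_none _ _ hdc]
    congr 1
    exact congrArg _ (List.map_congr_left fun g hg => pvPad_eq g (h4 g hg))
  | some p =>
    obtain ⟨l, r⟩ := p
    rw [pvScan_some _ _ _ _ hdc, pvSplit_rep]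
    have hcs := pvSplitDC_eq _ _ _ hdc
    have hsplit : List.splitOnP (· == ':') strs.toList
        = List.splitOnP (· == ':') l ++ [] :: List.splitOnP (· == ':') r := by
      rw [hcs, List.splitOnP_append_cons (· == ':') l _ ':' rfl, List.splitOnP_cons]
      simp
    rw [hsplit] at h4
    congr 1
    refine congrArg _ (List.map_congr_left fun g hg => pvPad_eq g ?_)
    rcases List.mem_append.mp hg with hg | hg
    · rcases List.mem_append.mp hg with hg | hg
      · exact h4 g (by simp [hg])
      · have : g = ['0'] := List.eq_of_mem_replicate hg
        simp [this]
    · exact h4 g (by simp [hg])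

-- ===== VERDICT (by name: the statement is the Claim_ definition above) =====
theorem solution_spec : Claim_equal_solution := by
  intro strs _ hpre
  unfold Spec_solution
  exact pv_main strs hpre
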